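-- pv_equiv track=rewrite | github.com/OFS/opae-sdk | python/opae.http/opae/http/properties.py | resolve_aliases
-- ===== SOURCE A (Python) =====
-- def resolve_aliases(d):
--     aliases = {'num_slots':   ['numSlots'],
--                'bbs_id':      ['bbsId'],
--                'bbs_version': ['bbsVersion'],
--               }
--     c = d.copy()
--     for attr, alias_list in aliases.items():
--         if attr in c:
--             continue
--         for a in alias_list:
--             if a in c:
--                 c[attr] = c[a]
--                 del c[a]
--     return c
-- ===== SOURCE B (Python) =====
-- def resolve_aliases(d):
--     # One pass over the data consulting a reverse alias index, instead of
--     # probing the dict per alias-table row and mutating a copy in place.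
--     a2c = {'numSlots': 'num_slots', 'bbsId': 'bbs_id', 'bbsVersion': 'bbs_version'}
--     kept = [(k, v) for k, v in d.items()
--             if not (k in a2c and a2c[k] not in d)]
--     renamed = [(canon, d[alias]) for alias, canon in a2c.items()
--                if canon not in d and alias in d]
--     return dict(kept + renamed)
-- ===== Notes on version B (the rewrite author's own statement) =====
-- stated objective: simpler
-- what changed: Replaces the alias-table outer loop that probes and mutates a dict copy (insert canonical, delete alias) with a reverse alias-to-canonical index and a single pass over the data: a comprehension keeps/drops entries, plus one comprehension of renamed entries appended at the end.
import Mathlib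
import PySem

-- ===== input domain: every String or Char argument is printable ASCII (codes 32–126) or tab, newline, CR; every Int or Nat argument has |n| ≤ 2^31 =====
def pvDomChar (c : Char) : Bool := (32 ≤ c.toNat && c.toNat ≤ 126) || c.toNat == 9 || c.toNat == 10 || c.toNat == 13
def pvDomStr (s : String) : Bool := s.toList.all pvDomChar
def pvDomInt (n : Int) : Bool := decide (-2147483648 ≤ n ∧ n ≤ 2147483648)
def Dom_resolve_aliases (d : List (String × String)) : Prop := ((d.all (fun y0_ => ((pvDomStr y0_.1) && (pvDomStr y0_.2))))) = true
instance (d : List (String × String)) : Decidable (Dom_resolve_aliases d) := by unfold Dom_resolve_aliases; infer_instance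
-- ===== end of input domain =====

-- B replaces A's alias-table loop that probes and mutates a dict copy with a reverse
-- alias→canonical index and a single pass over the data (keep/drop + renamed tail); same cost.

-- ===== PORT A =====
-- the literal alias table of A
def pvAliases : List (String × List String) :=
  [("num_slots", ["numSlots"]), ("bbs_id", ["bbsId"]), ("bbs_version", ["bbsVersion"])]

-- body of A's outer loop: skip if the canonical key is present, else rename each present alias
def pvStepA (c : PySem.Dict String String) (p : String × List String) : PySem.Dict String String :=
  if c.contains p.1 then c
  else p.2.foldl (fun c a => if c.contains a then (c.insert p.1 (c.getD a "")).erase a else c) c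
  -- c.getD a "" is exact here: c[a] is only evaluated under the guard 'a in c'

def resolve_aliases (d : List (String × String)) : List (String × String) :=
  (pvAliases.foldl pvStepA (PySem.Dict.ofList d)).items

-- ===== PORT B =====
-- the reverse index alias → canonical of Source B
def pvA2C : List (String × String) :=
  [("numSlots", "num_slots"), ("bbsId", "bbs_id"), ("bbsVersion", "bbs_version")]

def resolve_aliases_alt (d : List (String × String)) : List (String × String) :=
  let a2c := PySem.Dict.ofList pvA2C
  let dd := PySem.Dict.ofList d
  let kept := dd.items.filter (fun p => !(a2c.contains p.1 && !(dd.contains (a2c.getD p.1 ""))))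
  let renamed := a2c.items.filterMap
    (fun q => if !(dd.contains q.2) && dd.contains q.1 then some (q.2, dd.getD q.1 "") else none)
  -- Source B returns dict(kept + renamed); the keys of kept ++ renamed are pairwise distinct
  -- (renamed only adds canonical keys absent from d), so that dict's items are exactly kept ++ renamed
  kept ++ renamed

-- ===== PRECONDITION & SPEC =====
def Spec_resolve_aliases (d : List (String × String)) (out : List (String × String)) : Prop := out = resolve_aliases_alt d
instance (d : List (String × String)) (out : List (String × String)) : Decidable (Spec_resolve_aliases d out) := by unfold Spec_resolve_aliases; infer_instance

-- ===== CLAIM (what is proved, stated in full; the proofs are below) =====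
def Claim_equal_resolve_aliases : Prop := ∀ (d : List (String × String)), Dom_resolve_aliases d → Spec_resolve_aliases d (resolve_aliases d)

-- ===== LEMMAS AND PROOFS =====

-- find? through a filter that cannot discard a match
theorem pv_find?_filter {α : Type} (l : List α) (p q : α → Bool)
    (h : ∀ a, q a = true → p a = true) : (l.filter p).find? q = l.find? q := by
  induction l with
  | nil => rfl
  | cons x xs ih =>
    by_cases hq : q x = true
    · simp [h x hq, hq]
    · by_cases hp : p x = true <;> simp [hp, hq, ih]

-- one step of A's loop, written as a filter plus a conditionally appended renamed entry
theorem pv_step_items (c : PySem.Dict String String) (attr a : String)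
    (h : (attr == a) = false) :
    (pvStepA c (attr, [a])).items =
      c.items.filter (fun p => !((p.1 == a) && !(c.contains attr)))
        ++ (if !(c.contains attr) && c.contains a then [(attr, c.getD a "")] else []) := by
  unfold pvStepA
  by_cases hattr : c.contains attr = true
  · simp [hattr]
  · simp only [Bool.not_eq_true] at hattr
    by_cases ha : c.contains a = true
    · simp [ha, PySem.Dict.erase, PySem.Dict.items_insert_of_not_contains c _ hattr, hattr,
        List.filter_append, h]
    · simp only [Bool.not_eq_true] at ha
      have hk : ∀ p ∈ c.items, (p.1 == a) = false := by
        intro p hp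
        by_contra hne
        simp only [Bool.not_eq_false] at hne
        have hc : c.contains a = true := by
          unfold PySem.Dict.contains
          exact List.any_eq_true.mpr ⟨p, hp, hne⟩
        simp [hc] at ha
      simp only [hattr, ha, Bool.not_false, Bool.and_false, List.foldl_cons, List.foldl_nil]
      simp only [Bool.false_eq_true, if_false, List.append_nil]
      exact (List.filter_eq_self.mpr (fun p hp => by simp [hk p hp])).symm

-- a step only touches the keys attr and a: containment of any other key is unchanged
theorem pv_step_contains (c : PySem.Dict String String) (attr a k : String)
    (h1 : (k == attr) = false) (h2 : (k == a) = false) :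
    (pvStepA c (attr, [a])).contains k = c.contains k := by
  unfold pvStepA
  by_cases hattr : c.contains attr = true
  · simp [hattr]
  · simp only [Bool.not_eq_true] at hattr
    by_cases ha : c.contains a = true
    · simp only [hattr, Bool.false_eq_true, if_false, List.foldl_cons, List.foldl_nil, ha, if_true]
      simp only [PySem.Dict.contains, PySem.Dict.erase,
        PySem.Dict.items_insert_of_not_contains c _ hattr, List.any_filter]
      have hp : ∀ p : String × String, ((!(p.1 == a)) && (p.1 == k)) = (p.1 == k) := by
        intro p
        by_cases hpk : (p.1 == k) = true
        · have := eq_of_beq hpk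
          subst this
          simp [h2]
        · simp [hpk]
      rw [List.any_congr rfl hp]
      simp [BEq.symm_false h1]
    · simp [hattr, ha]

-- a step only touches the keys attr and a: lookup of any other key is unchanged
theorem pv_step_getD (c : PySem.Dict String String) (attr a k : String) (v : String)
    (h1 : (k == attr) = false) (h2 : (k == a) = false) :
    (pvStepA c (attr, [a])).getD k v = c.getD k v := by
  unfold pvStepA
  by_cases hattr : c.contains attr = true
  · simp [hattr]
  · simp only [Bool.not_eq_true] at hattr
    by_cases ha : c.contains a = true
    · simp only [hattr, Bool.false_eq_true, if_false, List.foldl_cons, List.foldl_nil, ha, if_true]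
      simp only [PySem.Dict.getD, PySem.Dict.get?, PySem.Dict.erase,
        PySem.Dict.items_insert_of_not_contains c _ hattr]
      rw [pv_find?_filter _ _ _ (fun p hp => by
        have := eq_of_beq hp
        subst this
        simp [h2])]
      simp [List.find?_append, BEq.symm_false h1]
    · simp [hattr, ha]

-- a filter-of-append residue: a conditionally appended singleton that the filter keeps
theorem pv_filter_if_singleton (b : Bool) (x : String × String) (f : String × String → Bool)
    (h : f x = true) : (if b then [x] else []).filter f = (if b then [x] else []) := by
  cases b <;> simp [h]

-- ===== VERDICT (by name: the statement is the Claim_ definition above) =====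
theorem resolve_aliases_spec : Claim_equal_resolve_aliases := by
  intro d _
  unfold Spec_resolve_aliases resolve_aliases resolve_aliases_alt pvAliases
  set dd := PySem.Dict.ofList d with hdd
  simp only [List.foldl_cons, List.foldl_nil]
  rw [pv_step_items _ "bbs_version" "bbsVersion" (by decide),
      pv_step_contains _ "bbs_id" "bbsId" "bbs_version" (by decide) (by decide),
      pv_step_contains _ "num_slots" "numSlots" "bbs_version" (by decide) (by decide),
      pv_step_contains _ "bbs_id" "bbsId" "bbsVersion" (by decide) (by decide),
      pv_step_contains _ "num_slots" "numSlots" "bbsVersion" (by decide) (by decide),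
      pv_step_getD _ "bbs_id" "bbsId" "bbsVersion" _ (by decide) (by decide),
      pv_step_getD _ "num_slots" "numSlots" "bbsVersion" _ (by decide) (by decide),
      pv_step_items _ "bbs_id" "bbsId" (by decide),
      pv_step_contains _ "num_slots" "numSlots" "bbs_id" (by decide) (by decide),
      pv_step_contains _ "num_slots" "numSlots" "bbsId" (by decide) (by decide),
      pv_step_getD _ "num_slots" "numSlots" "bbsId" _ (by decide) (by decide),
      pv_step_items _ "num_slots" "numSlots" (by decide)]
  rw [List.filter_append, List.filter_append, List.filter_append,
      pv_filter_if_singleton _ _ _ (by simp [show (("num_slots":String) == "bbsId") = false from by decide]),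
      pv_filter_if_singleton _ _ _ (by simp [show (("num_slots":String) == "bbsVersion") = false from by decide]),
      pv_filter_if_singleton _ _ _ (by simp [show (("bbs_id":String) == "bbsVersion") = false from by decide]),
      List.filter_filter, List.filter_filter]
  have ha2c : PySem.Dict.ofList pvA2C = PySem.Dict.mk pvA2C := by decide
  rw [ha2c, List.filterMap_eq_flatMap_toList]
  simp only [pvA2C, List.flatMap_cons, List.flatMap_nil, apply_ite Option.toList,
    Option.toList_some, Option.toList_none, List.append_nil, List.append_assoc]
  congr 1
  apply List.filter_congr
  intro p _
  by_cases h1 : p.1 = "numSlots"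
  · simp [h1, PySem.Dict.contains, PySem.Dict.getD, PySem.Dict.get?]
  · by_cases h2 : p.1 = "bbsId"
    · simp [h2, PySem.Dict.contains, PySem.Dict.getD, PySem.Dict.get?]
    · by_cases h3 : p.1 = "bbsVersion"
      · simp [h3, PySem.Dict.contains, PySem.Dict.getD, PySem.Dict.get?]
      · have e1 : (p.1 == "numSlots") = false := beq_eq_false_iff_ne.mpr h1
        have e2 : (p.1 == "bbsId") = false := beq_eq_false_iff_ne.mpr h2
        have e3 : (p.1 == "bbsVersion") = false := beq_eq_false_iff_ne.mpr h3
        simp [PySem.Dict.contains, PySem.Dict.getD, PySem.Dict.get?,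
          e1, e2, e3, BEq.symm_false e1, BEq.symm_false e2, BEq.symm_false e3]
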